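-- pv_equiv track=rewrite | github.com/amol-ship-it/agi-core | domains/arc/primitives.py | flood_fill_enclosed_with_accent
-- ===== SOURCE A (Python) =====
-- Grid = list[list[int]]
--
-- def flood_fill_enclosed_with_accent(grid: Grid) -> Grid:
--     """Fill enclosed 0-regions with the accent (2nd most common) color.
--
--     Finds 0-cells not reachable from the grid border (treating non-zero as
--     walls). Fills those with the second most common non-zero color.
--     """
--     if not grid or not grid[0]:
--         return grid
--     h, w = len(grid), len(grid[0])
--
--     # Find border-reachable zeros
--     border_reachable: set[tuple[int, int]] = set()
--     stack: list[tuple[int, int]] = []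
--     for r in range(h):
--         for c in range(w):
--             if (r == 0 or r == h - 1 or c == 0 or c == w - 1) and grid[r][c] == 0:
--                 stack.append((r, c))
--     while stack:
--         r, c = stack.pop()
--         if (r, c) in border_reachable:
--             continue
--         border_reachable.add((r, c))
--         for dr, dc in [(-1, 0), (1, 0), (0, -1), (0, 1)]:
--             nr, nc = r + dr, c + dc
--             if 0 <= nr < h and 0 <= nc < w and grid[nr][nc] == 0 and (nr, nc) not in border_reachable:
--                 stack.append((nr, nc))
--
--     # Find accent color (2nd most common non-zero)
--     from collections import Counter
--     color_counts = Counter(grid[r][c] for r in range(h) for c in range(w) if grid[r][c] != 0)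
--     if len(color_counts) < 2:
--         # If only 1 color, use it
--         fill_color = color_counts.most_common(1)[0][0] if color_counts else 0
--     else:
--         fill_color = color_counts.most_common(2)[1][0]
--
--     result = [row[:] for row in grid]
--     for r in range(h):
--         for c in range(w):
--             if grid[r][c] == 0 and (r, c) not in border_reachable:
--                 result[r][c] = fill_color
--     return result
-- ===== SOURCE B (Python) =====
-- Grid = list[list[int]]
--
-- def flood_fill_enclosed_with_accent(grid: Grid) -> Grid:
--     """Fill enclosed 0-regions with the accent (2nd most common) color.
--
--     The set of zeros reachable from the border is computed by fixed-point
--     relaxation: seed with the border zeros, then repeatedly sweep the grid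
--     adding any zero cell adjacent to the reachable set until a sweep adds
--     nothing.
--     """
--     if not grid or not grid[0]:
--         return grid
--     h, w = len(grid), len(grid[0])
--
--     reach = {(r, c) for r in range(h) for c in range(w)
--              if grid[r][c] == 0 and (r == 0 or r == h - 1 or c == 0 or c == w - 1)}
--     changed = True
--     while changed:
--         changed = False
--         for r in range(h):
--             for c in range(w):
--                 if grid[r][c] == 0 and (r, c) not in reach and (
--                         (r - 1, c) in reach or (r + 1, c) in reach
--                         or (r, c - 1) in reach or (r, c + 1) in reach):
--                     reach.add((r, c))
--                     changed = True
--
--     from collections import Counter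
--     color_counts = Counter(grid[r][c] for r in range(h) for c in range(w) if grid[r][c] != 0)
--     if len(color_counts) < 2:
--         fill_color = color_counts.most_common(1)[0][0] if color_counts else 0
--     else:
--         fill_color = color_counts.most_common(2)[1][0]
--
--     result = [row[:] for row in grid]
--     for r in range(h):
--         for c in range(w):
--             if grid[r][c] == 0 and (r, c) not in reach:
--                 result[r][c] = fill_color
--     return result
-- ===== Notes on version B (the rewrite author's own statement) =====
-- stated objective: alternative
-- what changed: The explicit-stack DFS flood fill is replaced by fixed-point relaxation: seed the reachable set with the border zeros and repeatedly sweep the grid adding any zero cell adjacent to the reachable set until a sweep changes nothing; the Counter-based accent-color selection and the copy-then-fill output pass are kept. Pre_ excludes only ragged grids with a row shorter than row 0, on which A raises IndexError.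
-- outside the precondition, e.g. on flood_fill_enclosed_with_accent([[1, 2], [3]]): A raises IndexError, B raises IndexError
import Mathlib
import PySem

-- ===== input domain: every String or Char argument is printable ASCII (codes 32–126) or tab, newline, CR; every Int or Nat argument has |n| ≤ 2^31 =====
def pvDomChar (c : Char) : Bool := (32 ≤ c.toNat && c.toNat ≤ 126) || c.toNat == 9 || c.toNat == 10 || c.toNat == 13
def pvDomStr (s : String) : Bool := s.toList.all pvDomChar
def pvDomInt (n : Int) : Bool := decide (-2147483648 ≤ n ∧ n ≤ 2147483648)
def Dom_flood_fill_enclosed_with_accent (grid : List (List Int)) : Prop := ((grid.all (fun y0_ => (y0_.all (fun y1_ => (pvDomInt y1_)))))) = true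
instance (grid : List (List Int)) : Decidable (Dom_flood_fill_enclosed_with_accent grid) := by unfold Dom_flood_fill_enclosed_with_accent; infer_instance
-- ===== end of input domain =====

-- B replaces A's explicit-stack DFS by fixed-point relaxation sweeps over the grid
-- (objective: alternative); return values agree on Pre_.

-- ===== PORT A =====

-- grid[r][c]; every access in both programs is in range under Pre_, so the defaults never fire.
def pvCell (grid : List (List Int)) (r c : Int) : Int :=
  PySem.List.pyGetD (PySem.List.pyGetD grid r []) c 0

-- result[r][c] = v (r, c nonnegative wherever used)
def pvSet2 (m : List (List Int)) (r c : Int) (v : Int) : List (List Int) :=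
  m.set r.toNat ((m.getD r.toNat []).set c.toNat v)

-- the `while stack:` DFS loop; fuel only makes it total (proved sufficient below), head of list = top of stack
def pvDfsA (grid : List (List Int)) (h w : Int) :
    Nat → List (Int × Int) → PySem.Set (Int × Int) → PySem.Set (Int × Int)
  | 0, _, vis => vis
  | _ + 1, [], vis => vis
  | fuel + 1, (r, c) :: rest, vis =>
    if (r, c) ∈ vis then pvDfsA grid h w fuel rest vis
    else
      let vis' := PySem.Set.add vis (r, c)
      let rest' := [((-1 : Int), (0 : Int)), (1, 0), (0, -1), (0, 1)].foldl
        (fun st d =>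
          if 0 ≤ r + d.1 ∧ r + d.1 < h ∧ 0 ≤ c + d.2 ∧ c + d.2 < w ∧
              pvCell grid (r + d.1) (c + d.2) = 0 ∧ (r + d.1, c + d.2) ∉ vis'
          then (r + d.1, c + d.2) :: st else st) rest
      pvDfsA grid h w fuel rest' vis'

-- the Counter / most_common accent-color selection (Counter ties break by first insertion; sorted is
-- stable); this block is textually identical in A and in B, so both ports share this helper
def pvFillColor (grid : List (List Int)) (h w : Int) : Int :=
  let counts : PySem.Dict Int Int :=
    (PySem.List.pyRange 0 h 1).foldl (fun d r =>
      (PySem.List.pyRange 0 w 1).foldl (fun d c =>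
        if pvCell grid r c ≠ 0 then d.modify (pvCell grid r c) 0 (· + 1) else d) d) PySem.Dict.empty
  let mc := PySem.List.sorted counts.items (fun kv => kv.2) true
  if counts.size < 2 then
    match mc with
    | [] => 0                   -- `if color_counts else 0`
    | kv :: _ => kv.1           -- most_common(1)[0][0]
  else
    match mc with
    | _ :: kv :: _ => kv.1      -- most_common(2)[1][0]
    | _ => 0                    -- unreachable: counts.size ≥ 2

def flood_fill_enclosed_with_accent (grid : List (List Int)) : List (List Int) :=
  if grid = [] ∨ grid.headD [] = [] then grid
  else
    let h : Int := grid.length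
    let w : Int := (grid.headD []).length
    let stack := (PySem.List.pyRange 0 h 1).foldl (fun st r =>
      (PySem.List.pyRange 0 w 1).foldl (fun st c =>
        if (r = 0 ∨ r = h - 1 ∨ c = 0 ∨ c = w - 1) ∧ pvCell grid r c = 0
        then (r, c) :: st else st) st) []
    let vis := pvDfsA grid h w
      (5 * (grid.length * (grid.headD []).length) + stack.length + 1) stack PySem.Set.empty
    let fill := pvFillColor grid h w
    (PySem.List.pyRange 0 h 1).foldl (fun res r =>
      (PySem.List.pyRange 0 w 1).foldl (fun res c =>
        if pvCell grid r c = 0 ∧ (r, c) ∉ vis then pvSet2 res r c fill else res) res) grid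

-- ===== PORT B =====

-- one full relaxation sweep over the grid: state = (reach, changed)
def pvSweepB (grid : List (List Int)) (h w : Int) (S : PySem.Set (Int × Int)) :
    PySem.Set (Int × Int) × Bool :=
  (PySem.List.pyRange 0 h 1).foldl (fun st r =>
    (PySem.List.pyRange 0 w 1).foldl (fun st c =>
      if pvCell grid r c = 0 ∧ (r, c) ∉ st.1 ∧
          ((r - 1, c) ∈ st.1 ∨ (r + 1, c) ∈ st.1 ∨ (r, c - 1) ∈ st.1 ∨ (r, c + 1) ∈ st.1)
      then (PySem.Set.add st.1 (r, c), true) else st) st) (S, false)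

-- `while changed:`; fuel only makes it total (each continuing sweep grows the set, proved below)
def pvLoopB (grid : List (List Int)) (h w : Int) : Nat → PySem.Set (Int × Int) → PySem.Set (Int × Int)
  | 0, S => S
  | fuel + 1, S =>
    let sw := pvSweepB grid h w S
    if sw.2 then pvLoopB grid h w fuel sw.1 else sw.1

def flood_fill_enclosed_with_accent_alt (grid : List (List Int)) : List (List Int) :=
  if grid = [] ∨ grid.headD [] = [] then grid
  else
    let h : Int := grid.length
    let w : Int := (grid.headD []).length
    let seeds := (PySem.List.pyRange 0 h 1).foldl (fun s r =>
      (PySem.List.pyRange 0 w 1).foldl (fun s c =>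
        if pvCell grid r c = 0 ∧ (r = 0 ∨ r = h - 1 ∨ c = 0 ∨ c = w - 1)
        then PySem.Set.add s (r, c) else s) s) PySem.Set.empty
    let reach := pvLoopB grid h w (grid.length * (grid.headD []).length + 1) seeds
    let fill := pvFillColor grid h w
    -- result = [row[:] for row in grid]; then the fill loop mutates it
    (PySem.List.pyRange 0 h 1).foldl (fun res r =>
      (PySem.List.pyRange 0 w 1).foldl (fun res c =>
        if pvCell grid r c = 0 ∧ (r, c) ∉ reach then pvSet2 res r c fill else res) res) grid

-- ===== PRECONDITION & SPEC =====
-- Pre_ excludes exactly the ragged grids with a row shorter than row 0, on which A raises IndexError.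
def Pre_flood_fill_enclosed_with_accent (grid : List (List Int)) : Prop :=
  ∀ row ∈ grid, (grid.headD []).length ≤ row.length
instance (grid : List (List Int)) : Decidable (Pre_flood_fill_enclosed_with_accent grid) := by
  unfold Pre_flood_fill_enclosed_with_accent; infer_instance

def pvWitness_flood_fill_enclosed_with_accent : List (List Int) :=
  [[1, 2, 1], [2, 0, 2], [1, 2, 1]]

def Spec_flood_fill_enclosed_with_accent (grid : List (List Int)) (out : List (List Int)) : Prop := out = flood_fill_enclosed_with_accent_alt grid
instance (grid : List (List Int)) (out : List (List Int)) : Decidable (Spec_flood_fill_enclosed_with_accent grid out) := by unfold Spec_flood_fill_enclosed_with_accent; infer_instance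

-- ===== CLAIM (what is proved, stated in full; the proofs are below) =====
def Claim_equal_flood_fill_enclosed_with_accent : Prop := ∀ (grid : List (List Int)), Dom_flood_fill_enclosed_with_accent grid → Pre_flood_fill_enclosed_with_accent grid → Spec_flood_fill_enclosed_with_accent grid (flood_fill_enclosed_with_accent grid)

-- ===== LEMMAS AND PROOFS =====

-- grid-cell vocabulary used only by the proofs
def pvInb (H W : Int) (p : Int × Int) : Prop := 0 ≤ p.1 ∧ p.1 < H ∧ 0 ≤ p.2 ∧ p.2 < W
def pvZ (g : List (List Int)) (H W : Int) (p : Int × Int) : Prop :=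
  pvInb H W p ∧ pvCell g p.1 p.2 = 0
def pvBorder (H W : Int) (p : Int × Int) : Prop :=
  p.1 = 0 ∨ p.1 = H - 1 ∨ p.2 = 0 ∨ p.2 = W - 1
def pvAdj (p q : Int × Int) : Prop :=
  q = (p.1 - 1, p.2) ∨ q = (p.1 + 1, p.2) ∨ q = (p.1, p.2 - 1) ∨ q = (p.1, p.2 + 1)

-- border-reachability through zero cells: the semantic meaning both algorithms compute
inductive pvReach (g : List (List Int)) (H W : Int) : Int × Int → Prop
  | seed (p : Int × Int) : pvZ g H W p → pvBorder H W p → pvReach g H W p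
  | step (p q : Int × Int) : pvReach g H W p → pvAdj p q → pvZ g H W q → pvReach g H W q

lemma pvReach_subset {g : List (List Int)} {H W : Int} {S : List (Int × Int)}
    (hseed : ∀ p, pvZ g H W p → pvBorder H W p → p ∈ S)
    (hclosed : ∀ p ∈ S, ∀ q, pvAdj p q → pvZ g H W q → q ∈ S) :
    ∀ p, pvReach g H W p → p ∈ S := by
  intro p hp
  induction hp with
  | seed p hz hb => exact hseed p hz hb
  | step p q _ hadj hz ih => exact hclosed p ih q hadj hz

-- all in-bounds cells, row-major
def pvCL (H W : Int) : List (Int × Int) :=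
  (PySem.List.pyRange 0 H 1).flatMap (fun r => (PySem.List.pyRange 0 W 1).map (fun c => (r, c)))

lemma pv_mem_CL {H W : Int} {p : Int × Int} : p ∈ pvCL H W ↔ pvInb H W p := by
  cases p with
  | mk r c =>
    simp [pvCL, pvInb, PySem.List.mem_pyRange_one, Prod.ext_iff]
    tauto

lemma pv_length_CL (g : List (List Int)) :
    (pvCL (g.length : Int) ((g.headD []).length : Int)).length =
      g.length * (g.headD []).length := by
  simp [pvCL, PySem.List.pyRange_zero_natCast, List.length_flatMap, List.map_map,
    Function.comp_def]

-- generic: membership in a cons-if fold (a loop pushing selected items on a stack)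
lemma pv_mem_foldl_consif {β : Type} (P : β → Prop) [DecidablePred P] (f : β → Int × Int) :
    ∀ (l : List β) (init : List (Int × Int)) (q : Int × Int),
      q ∈ l.foldl (fun st d => if P d then f d :: st else st) init ↔
        q ∈ init ∨ ∃ d ∈ l, P d ∧ q = f d := by
  intro l
  induction l with
  | nil => simp
  | cons d t ih =>
    intro init q
    simp only [List.foldl_cons, ih]
    by_cases hd : P d <;> simp [hd] <;> tauto

lemma pv_length_foldl_consif_le {β : Type} (P : β → Prop) [DecidablePred P] (f : β → Int × Int) :
    ∀ (l : List β) (init : List (Int × Int)),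
      (l.foldl (fun st d => if P d then f d :: st else st) init).length ≤ init.length + l.length := by
  intro l
  induction l with
  | nil => simp
  | cons d t ih =>
    intro init
    simp only [List.foldl_cons, List.length_cons]
    by_cases hd : P d
    · simpa [hd] using le_trans (ih _) (by simp; omega)
    · simpa [hd] using le_trans (ih _) (by omega)

-- strict countP decrease with a witness
lemma pv_countP_succ_le {α : Type} {p q : α → Bool} (hpq : ∀ x, q x = true → p x = true) :
    ∀ {l : List α} {a : α}, a ∈ l → p a = true → q a = false →
      l.countP q + 1 ≤ l.countP p := by
  intro l
  induction l with
  | nil => simp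
  | cons x t ih =>
    intro a ha hpa hqa
    rcases List.mem_cons.1 ha with rfl | ha'
    · simp only [List.countP_cons, hpa, hqa]
      simpa using Nat.add_le_add (List.countP_mono_left (fun x _ => hpq x)) (le_refl 1)
    · have h2 := ih ha' hpa hqa
      simp only [List.countP_cons]
      by_cases hx : q x = true
      · have := hpq x hx
        simp [hx, this]
        omega
      · simp only [Bool.not_eq_true] at hx
        simp only [hx]
        norm_num
        by_cases hpx : p x = true
        · simp [hpx]; omega
        · simp [hpx] at *; omega

-- neighbours pushed by one DFS expansion step
lemma pvDfsA_push_mem (g : List (List Int)) (H W r c : Int) (V' rest : List (Int × Int))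
    (q : Int × Int) :
    q ∈ [((-1 : Int), (0 : Int)), (1, 0), (0, -1), (0, 1)].foldl
        (fun st d =>
          if 0 ≤ r + d.1 ∧ r + d.1 < H ∧ 0 ≤ c + d.2 ∧ c + d.2 < W ∧
              pvCell g (r + d.1) (c + d.2) = 0 ∧ (r + d.1, c + d.2) ∉ V'
          then (r + d.1, c + d.2) :: st else st) rest ↔
      q ∈ rest ∨ (pvAdj (r, c) q ∧ pvZ g H W q ∧ q ∉ V') := by
  rw [pv_mem_foldl_consif
    (P := fun d : Int × Int => 0 ≤ r + d.1 ∧ r + d.1 < H ∧ 0 ≤ c + d.2 ∧ c + d.2 < W ∧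
      pvCell g (r + d.1) (c + d.2) = 0 ∧ (r + d.1, c + d.2) ∉ V')
    (f := fun d => (r + d.1, c + d.2))]
  constructor
  · rintro (hq | ⟨d, hd, hP, rfl⟩)
    · exact Or.inl hq
    · fin_cases hd <;>
        refine Or.inr ⟨?_, ⟨⟨hP.1, hP.2.1, hP.2.2.1, hP.2.2.2.1⟩, hP.2.2.2.2.1⟩, hP.2.2.2.2.2⟩ <;>
        simp [pvAdj, Prod.ext_iff] <;> omega
  · obtain ⟨qa, qb⟩ := q
    rintro (hq | ⟨hadj, ⟨⟨h1, h2, h3, h4⟩, h5⟩, h6⟩)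
    · exact Or.inl hq
    · refine Or.inr ?_
      rcases hadj with h | h | h | h <;> rw [Prod.ext_iff] at h <;> simp at h <;>
        obtain ⟨ha, hb⟩ := h
      · refine ⟨((-1 : Int), (0 : Int)), by simp, ?_, by ext <;> simp <;> omega⟩
        have he : r + (-1 : Int) = qa ∧ c + (0 : Int) = qb := by constructor <;> omega
        refine ⟨by omega, by omega, by omega, by omega, ?_, ?_⟩ <;> rw [he.1, he.2]
        exacts [h5, h6]
      · refine ⟨((1 : Int), (0 : Int)), by simp, ?_, by ext <;> simp <;> omega⟩
        have he : r + (1 : Int) = qa ∧ c + (0 : Int) = qb := by constructor <;> omega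
        refine ⟨by omega, by omega, by omega, by omega, ?_, ?_⟩ <;> rw [he.1, he.2]
        exacts [h5, h6]
      · refine ⟨((0 : Int), (-1 : Int)), by simp, ?_, by ext <;> simp <;> omega⟩
        have he : r + (0 : Int) = qa ∧ c + (-1 : Int) = qb := by constructor <;> omega
        refine ⟨by omega, by omega, by omega, by omega, ?_, ?_⟩ <;> rw [he.1, he.2]
        exacts [h5, h6]
      · refine ⟨((0 : Int), (1 : Int)), by simp, ?_, by ext <;> simp <;> omega⟩
        have he : r + (0 : Int) = qa ∧ c + (1 : Int) = qb := by constructor <;> omega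
        refine ⟨by omega, by omega, by omega, by omega, ?_, ?_⟩ <;> rw [he.1, he.2]
        exacts [h5, h6]

def pvUnv (H W : Int) (V : List (Int × Int)) : Nat :=
  (pvCL H W).countP (fun p => decide (p ∉ V))

-- the DFS computes exactly the border-reachable zero cells (fuel above the decreasing measure)
lemma pvDfsA_spec (g : List (List Int)) (H W : Int) :
    ∀ (fuel : Nat) (S : List (Int × Int)) (V : PySem.Set (Int × Int)),
      (∀ p ∈ S, pvZ g H W p) →
      (∀ p ∈ S, pvReach g H W p) →
      (∀ p ∈ V, pvZ g H W p) →
      (∀ p ∈ V, pvReach g H W p) →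
      V.Nodup →
      (∀ p ∈ V, ∀ q, pvAdj p q → pvZ g H W q → q ∈ V ∨ q ∈ S) →
      (∀ p, pvZ g H W p → pvBorder H W p → p ∈ V ∨ p ∈ S) →
      5 * pvUnv H W V + S.length < fuel →
      ∀ q, q ∈ pvDfsA g H W fuel S V ↔ pvReach g H W q := by
  intro fuel
  induction fuel with
  | zero => intro S V _ _ _ _ _ _ _ hm; omega
  | succ fuel ih =>
    intro S V hSZ hSR hVZ hVR hVnd hfr hseed hm q
    match S with
    | [] =>
      simp only [pvDfsA]
      constructor
      · exact fun hq => hVR q hq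
      · refine pvReach_subset (fun p hz hb => ?_) (fun p hp q' ha hz => ?_) q
        · rcases hseed p hz hb with h | h
          · exact h
          · simp at h
        · rcases hfr p hp q' ha hz with h | h
          · exact h
          · simp at h
    | (r, c) :: rest =>
      simp only [pvDfsA]
      by_cases hmem : (r, c) ∈ V
      · rw [if_pos hmem]
        refine ih rest V (fun p hp => hSZ p (List.mem_cons_of_mem _ hp))
          (fun p hp => hSR p (List.mem_cons_of_mem _ hp)) hVZ hVR hVnd
          (fun p hp q' ha hz => ?_) (fun p hz hb => ?_) (by simp at hm ⊢; omega) q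
        · rcases hfr p hp q' ha hz with h | h
          · exact Or.inl h
          · rcases List.mem_cons.1 h with rfl | h'
            · exact Or.inl hmem
            · exact Or.inr h'
        · rcases hseed p hz hb with h | h
          · exact Or.inl h
          · rcases List.mem_cons.1 h with rfl | h'
            · exact Or.inl hmem
            · exact Or.inr h'
      · rw [if_neg hmem]
        have hZrc : pvZ g H W (r, c) := hSZ _ (List.mem_cons_self)
        have hRrc : pvReach g H W (r, c) := hSR _ (List.mem_cons_self)
        have hV'mem : ∀ x, x ∈ PySem.Set.add V (r, c) ↔ x ∈ V ∨ x = (r, c) := fun x =>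
          PySem.Set.mem_add V (r, c) x
        have hmemrest' := pvDfsA_push_mem g H W r c (PySem.Set.add V (r, c)) rest
        refine ih _ _ (fun p hp => ?_) (fun p hp => ?_) (fun p hp => ?_) (fun p hp => ?_)
          (PySem.Set.nodup_add V (r, c) hVnd) ?_ ?_ ?_ q
        · rcases (hmemrest' p).1 hp with h | ⟨_, hz, _⟩
          · exact hSZ p (List.mem_cons_of_mem _ h)
          · exact hz
        · rcases (hmemrest' p).1 hp with h | ⟨ha, hz, _⟩
          · exact hSR p (List.mem_cons_of_mem _ h)
          · exact pvReach.step _ _ hRrc ha hz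
        · rcases (hV'mem p).1 hp with h | rfl
          · exact hVZ p h
          · exact hZrc
        · rcases (hV'mem p).1 hp with h | rfl
          · exact hVR p h
          · exact hRrc
        · -- frontier
          intro p hp q' ha hz
          rcases (hV'mem p).1 hp with h | rfl
          · rcases hfr p h q' ha hz with h' | h'
            · exact Or.inl ((hV'mem q').2 (Or.inl h'))
            · rcases List.mem_cons.1 h' with h'' | h''
              · exact Or.inl ((hV'mem q').2 (Or.inr h''))
              · exact Or.inr ((hmemrest' q').2 (Or.inl h''))
          · by_cases hq' : q' ∈ PySem.Set.add V (r, c)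
            · exact Or.inl hq'
            · exact Or.inr ((hmemrest' q').2 (Or.inr ⟨ha, hz, hq'⟩))
        · -- seeds
          intro p hz hb
          rcases hseed p hz hb with h | h
          · exact Or.inl ((hV'mem p).2 (Or.inl h))
          · rcases List.mem_cons.1 h with h' | h'
            · exact Or.inl ((hV'mem p).2 (Or.inr h'))
            · exact Or.inr ((hmemrest' p).2 (Or.inl h'))
        · -- measure
          have hlen := pv_length_foldl_consif_le
              (P := fun d : Int × Int => 0 ≤ r + d.1 ∧ r + d.1 < H ∧ 0 ≤ c + d.2 ∧ c + d.2 < W ∧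
                pvCell g (r + d.1) (c + d.2) = 0 ∧ (r + d.1, c + d.2) ∉ PySem.Set.add V (r, c))
              (f := fun d => (r + d.1, c + d.2))
              [((-1 : Int), (0 : Int)), (1, 0), (0, -1), (0, 1)] rest
          simp only [List.length_cons, List.length_nil] at hlen
          have hcnt : pvUnv H W (PySem.Set.add V (r, c)) + 1 ≤ pvUnv H W V := by
            refine pv_countP_succ_le (fun x hx => ?_) (pv_mem_CL.2 hZrc.1) ?_ ?_
            · simp only [decide_eq_true_eq] at hx ⊢
              exact fun hxV => hx ((hV'mem x).2 (Or.inl hxV))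
            · simpa using hmem
            · simp [hV'mem]
          simp only [List.length_cons] at hm
          omega

-- B side: one relaxation step on one cell
def pvStepB (g : List (List Int)) (st : PySem.Set (Int × Int) × Bool) (p : Int × Int) :
    PySem.Set (Int × Int) × Bool :=
  if pvCell g p.1 p.2 = 0 ∧ p ∉ st.1 ∧
      ((p.1 - 1, p.2) ∈ st.1 ∨ (p.1 + 1, p.2) ∈ st.1 ∨ (p.1, p.2 - 1) ∈ st.1 ∨ (p.1, p.2 + 1) ∈ st.1)
  then (PySem.Set.add st.1 p, true) else st

lemma pvSweepB_flat (g : List (List Int)) (H W : Int) (S : PySem.Set (Int × Int)) :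
    pvSweepB g H W S = (pvCL H W).foldl (pvStepB g) (S, false) := by
  simp only [pvSweepB, pvCL, List.foldl_flatMap, List.foldl_map, pvStepB]

-- the condition pvStepB tests
def pvCnd (g : List (List Int)) (S : List (Int × Int)) (p : Int × Int) : Prop :=
  pvCell g p.1 p.2 = 0 ∧ p ∉ S ∧
    ((p.1 - 1, p.2) ∈ S ∨ (p.1 + 1, p.2) ∈ S ∨ (p.1, p.2 - 1) ∈ S ∨ (p.1, p.2 + 1) ∈ S)

lemma pvCnd_reach {g : List (List Int)} {H W : Int} {S : List (Int × Int)} {p : Int × Int}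
    (hS : ∀ x ∈ S, pvReach g H W x) (hinb : pvInb H W p) (hc : pvCnd g S p) :
    pvReach g H W p := by
  obtain ⟨h0, _, hn⟩ := hc
  have hz : pvZ g H W p := ⟨hinb, h0⟩
  obtain ⟨a, b⟩ := p
  rcases hn with h | h | h | h
  · exact pvReach.step _ _ (hS _ h) (Or.inr (Or.inl (by simp only [Prod.mk.injEq]; exact ⟨by omega, trivial⟩))) hz
  · exact pvReach.step _ _ (hS _ h) (Or.inl (by simp only [Prod.mk.injEq]; exact ⟨by omega, trivial⟩)) hz
  · exact pvReach.step _ _ (hS _ h) (Or.inr (Or.inr (Or.inr (by simp only [Prod.mk.injEq]; exact ⟨trivial, by omega⟩)))) hz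
  · exact pvReach.step _ _ (hS _ h) (Or.inr (Or.inr (Or.inl (by simp only [Prod.mk.injEq]; exact ⟨trivial, by omega⟩)))) hz

-- invariant of one full sweep (fold of pvStepB over any cell list)
lemma pvStepB_fold_spec (g : List (List Int)) (H W : Int) :
    ∀ (l : List (Int × Int)) (S : PySem.Set (Int × Int)) (b : Bool),
      (∀ p ∈ l, pvInb H W p) →
      (∀ p ∈ S, pvReach g H W p) →
      S.Nodup →
      (∃ T, (l.foldl (pvStepB g) (S, b)).1 = S ++ T ∧ ∀ t ∈ T, t ∈ l ∧ t ∉ S) ∧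
      (l.foldl (pvStepB g) (S, b)).1.Nodup ∧
      (∀ p ∈ (l.foldl (pvStepB g) (S, b)).1, pvReach g H W p) ∧
      ((l.foldl (pvStepB g) (S, b)).2 = b ∨
        ((l.foldl (pvStepB g) (S, b)).2 = true ∧ S.length < (l.foldl (pvStepB g) (S, b)).1.length)) ∧
      ((l.foldl (pvStepB g) (S, b)).2 = false →
        ((l.foldl (pvStepB g) (S, b)).1 = S ∧ ∀ p ∈ l, ¬ pvCnd g S p)) := by
  intro l
  induction l with
  | nil =>
    intro S b _ hSR hSnd
    exact ⟨⟨[], by simp, by simp⟩, by simpa using hSnd, by simpa using hSR,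
      Or.inl rfl, fun _ => ⟨rfl, by simp⟩⟩
  | cons p t ih =>
    intro S b hinb hSR hSnd
    by_cases hc : pvCnd g S p
    · have hp_notmem : p ∉ S := hc.2.1
      have hadd : PySem.Set.add S p = S ++ [p] := PySem.Set.add_of_not_mem hp_notmem
      have hreach_p : pvReach g H W p := pvCnd_reach hSR (hinb p List.mem_cons_self) hc
      have hR' : ∀ x ∈ PySem.Set.add S p, pvReach g H W x := by
        intro x hx
        rcases (PySem.Set.mem_add S p x).1 hx with h | rfl
        · exact hSR x h
        · exact hreach_p
      have hnd' : (PySem.Set.add S p).Nodup := PySem.Set.nodup_add S p hSnd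
      have step_eq : List.foldl (pvStepB g) (S, b) (p :: t) =
          List.foldl (pvStepB g) (PySem.Set.add S p, true) t := by
        simp only [List.foldl_cons, pvStepB, pvCnd] at hc ⊢
        rw [if_pos hc]
      obtain ⟨⟨T, hT, hTmem⟩, hnd2, hR2, hb2, hfalse2⟩ :=
        ih (PySem.Set.add S p) true (fun x hx => hinb x (List.mem_cons_of_mem _ hx)) hR' hnd'
      rw [step_eq]
      have hlenT : S.length + 1 + T.length = (List.foldl (pvStepB g) (PySem.Set.add S p, true) t).1.length := by
        rw [hT, hadd]
        simp only [List.length_append, List.length_cons, List.length_nil]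
        try omega
      have hflag : (List.foldl (pvStepB g) (PySem.Set.add S p, true) t).2 = true := by
        rcases hb2 with h | ⟨h, _⟩ <;> exact h
      refine ⟨⟨p :: T, by rw [hT, hadd, List.append_assoc]; rfl, ?_⟩, hnd2, hR2, ?_, ?_⟩
      · intro x hx
        rcases List.mem_cons.1 hx with rfl | hx'
        · exact ⟨List.mem_cons_self, hp_notmem⟩
        · obtain ⟨hx1, hx2⟩ := hTmem x hx'
          refine ⟨List.mem_cons_of_mem _ hx1, fun hxS => hx2 ?_⟩
          exact (PySem.Set.mem_add S p x).2 (Or.inl hxS)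
      · exact Or.inr ⟨hflag, by omega⟩
      · intro hff; rw [hflag] at hff; exact absurd hff (by simp)
    · have step_eq : List.foldl (pvStepB g) (S, b) (p :: t) = List.foldl (pvStepB g) (S, b) t := by
        simp only [List.foldl_cons, pvStepB, pvCnd] at hc ⊢
        rw [if_neg hc]
      rw [step_eq]
      obtain ⟨⟨T, hT1, hT2⟩, hnd2, hR2, hb2, hfalse2⟩ :=
        ih S b (fun x hx => hinb x (List.mem_cons_of_mem _ hx)) hSR hSnd
      refine ⟨⟨T, hT1, fun x hx => ⟨List.mem_cons_of_mem _ (hT2 x hx).1, (hT2 x hx).2⟩⟩,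
        hnd2, hR2, hb2, fun hff => ?_⟩
      obtain ⟨h1, h2⟩ := hfalse2 hff
      refine ⟨h1, fun x hx => ?_⟩
      rcases List.mem_cons.1 hx with rfl | hx'
      · exact hc
      · exact h2 x hx'

-- the sweep loop computes exactly the border-reachable zero cells
lemma pvLoopB_spec (g : List (List Int)) (H W : Int) :
    ∀ (fuel : Nat) (S : PySem.Set (Int × Int)),
      S.Nodup →
      (∀ p ∈ S, pvReach g H W p) →
      (∀ p ∈ S, pvInb H W p) →
      (∀ p, pvZ g H W p → pvBorder H W p → p ∈ S) →
      pvUnv H W S < fuel →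
      ∀ q, q ∈ pvLoopB g H W fuel S ↔ pvReach g H W q := by
  intro fuel
  induction fuel with
  | zero => intro S _ _ _ _ hm; omega
  | succ fuel ih =>
    intro S hSnd hSR hSinb hseed hm q
    have hinbCL : ∀ p ∈ pvCL H W, pvInb H W p := fun p hp => pv_mem_CL.1 hp
    obtain ⟨⟨T, hT, hTmem⟩, hnd2, hR2, hb2, hfalse2⟩ :=
      pvStepB_fold_spec g H W (pvCL H W) S false hinbCL hSR hSnd
    simp only [pvLoopB, pvSweepB_flat]
    by_cases hflag : ((pvCL H W).foldl (pvStepB g) (S, false)).2 = true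
    · rw [if_pos hflag]
      have hTne : T ≠ [] := by
        rcases hb2 with h | ⟨_, hlen⟩
        · rw [h] at hflag; exact absurd hflag (by simp)
        · intro hTnil; rw [hTnil, List.append_nil] at hT; rw [hT] at hlen; omega
      obtain ⟨t0, hT0⟩ := List.exists_mem_of_ne_nil T hTne
      have ht0l : t0 ∈ pvCL H W := (hTmem t0 hT0).1
      have ht0S : t0 ∉ S := (hTmem t0 hT0).2
      have ht0S' : t0 ∈ ((pvCL H W).foldl (pvStepB g) (S, false)).1 := by
        rw [hT]; exact List.mem_append_right _ hT0
      refine ih _ hnd2 hR2 (fun p hp => ?_) (fun p hz hb => ?_) ?_ q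
      · rw [hT] at hp
        rcases List.mem_append.1 hp with h | h
        · exact hSinb p h
        · exact hinbCL p (hTmem p h).1
      · rw [hT]; exact List.mem_append_left _ (hseed p hz hb)
      · have hcnt : pvUnv H W ((pvCL H W).foldl (pvStepB g) (S, false)).1 + 1 ≤ pvUnv H W S := by
          refine pv_countP_succ_le (fun x hx => ?_) ht0l ?_ ?_
          · simp only [decide_eq_true_eq] at hx ⊢
            intro hxS; exact hx (by rw [hT]; exact List.mem_append_left _ hxS)
          · simpa using ht0S
          · simpa using ht0S'
        omega
    · rw [if_neg hflag]
      simp only [Bool.not_eq_true] at hflag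
      obtain ⟨hSeq, hnone⟩ := hfalse2 hflag
      rw [hSeq]
      constructor
      · exact fun hq => hSR q hq
      · refine pvReach_subset (fun p hz hb => hseed p hz hb) (fun p hp q' ha hz => ?_) q
        by_cases hq' : q' ∈ S
        · exact hq'
        · exfalso
          refine hnone q' (pv_mem_CL.2 hz.1) ⟨hz.2, hq', ?_⟩
          obtain ⟨qa, qb⟩ := q'
          rcases ha with h | h | h | h <;> rw [Prod.ext_iff] at h <;> simp at h <;>
            obtain ⟨h1, h2⟩ := h
          · refine Or.inr (Or.inl ?_)
            have : (qa + 1, qb) = p := by obtain ⟨pa, pb⟩ := p; simp at h1 h2 ⊢; omega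
            rw [this]; exact hp
          · refine Or.inl ?_
            have : (qa - 1, qb) = p := by obtain ⟨pa, pb⟩ := p; simp at h1 h2 ⊢; omega
            rw [this]; exact hp
          · refine Or.inr (Or.inr (Or.inr ?_))
            have : (qa, qb + 1) = p := by obtain ⟨pa, pb⟩ := p; simp at h1 h2 ⊢; omega
            rw [this]; exact hp
          · refine Or.inr (Or.inr (Or.inl ?_))
            have : (qa, qb - 1) = p := by obtain ⟨pa, pb⟩ := p; simp at h1 h2 ⊢; omega
            rw [this]; exact hp

-- membership in an add-if fold (building a Python set by conditional adds)
lemma pv_mem_foldl_addif {β : Type} (P : β → Prop) [DecidablePred P] (f : β → Int × Int) :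
    ∀ (l : List β) (init : PySem.Set (Int × Int)) (q : Int × Int),
      q ∈ l.foldl (fun s d => if P d then PySem.Set.add s (f d) else s) init ↔
        q ∈ init ∨ ∃ d ∈ l, P d ∧ q = f d := by
  intro l
  induction l with
  | nil => simp
  | cons d t ih =>
    intro init q
    simp only [List.foldl_cons, ih]
    by_cases hd : P d
    · simp only [hd, if_pos, PySem.Set.mem_add]
      constructor
      · rintro (⟨h | h⟩ | h)
        · exact Or.inl h
        · exact Or.inr ⟨d, by simp, hd, h⟩
        · obtain ⟨e, he, hP, rfl⟩ := h
          exact Or.inr ⟨e, List.mem_cons_of_mem _ he, hP, rfl⟩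
      · rintro (h | ⟨e, he, hP, rfl⟩)
        · exact Or.inl (Or.inl h)
        · rcases List.mem_cons.1 he with rfl | he'
          · exact Or.inl (Or.inr rfl)
          · exact Or.inr ⟨e, he', hP, rfl⟩
    · simp only [hd, if_neg, not_false_iff]
      constructor
      · rintro (h | ⟨e, he, hP, rfl⟩)
        · exact Or.inl h
        · exact Or.inr ⟨e, List.mem_cons_of_mem _ he, hP, rfl⟩
      · rintro (h | ⟨e, he, hP, rfl⟩)
        · exact Or.inl h
        · rcases List.mem_cons.1 he with rfl | he'
          · exact absurd hP hd
          · exact Or.inr ⟨e, he', hP, rfl⟩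

lemma pv_nodup_foldl_addif {β : Type} (P : β → Prop) [DecidablePred P] (f : β → Int × Int) :
    ∀ (l : List β) (init : PySem.Set (Int × Int)), init.Nodup →
      (l.foldl (fun s d => if P d then PySem.Set.add s (f d) else s) init).Nodup := by
  intro l
  induction l with
  | nil => exact fun init h => h
  | cons d t ih =>
    intro init hnd
    simp only [List.foldl_cons]
    by_cases hd : P d
    · simp only [hd, if_pos]
      exact ih _ (PySem.Set.nodup_add _ _ hnd)
    · simp only [hd, if_neg, not_false_iff]
      exact ih _ hnd

-- A's border-seed stack contains exactly the border zero cells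
lemma pv_seedsA_char (g : List (List Int)) (H W : Int) (q : Int × Int) :
    q ∈ (PySem.List.pyRange 0 H 1).foldl (fun st r =>
        (PySem.List.pyRange 0 W 1).foldl (fun st c =>
          if (r = 0 ∨ r = H - 1 ∨ c = 0 ∨ c = W - 1) ∧ pvCell g r c = 0
          then (r, c) :: st else st) st) [] ↔
      pvZ g H W q ∧ pvBorder H W q := by
  have main : ∀ (R : List Int) (init : List (Int × Int)),
      q ∈ R.foldl (fun st r => (PySem.List.pyRange 0 W 1).foldl (fun st c =>
          if (r = 0 ∨ r = H - 1 ∨ c = 0 ∨ c = W - 1) ∧ pvCell g r c = 0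
          then (r, c) :: st else st) st) init ↔
        q ∈ init ∨ ∃ r ∈ R, ∃ c, (0 ≤ c ∧ c < W) ∧
          ((r = 0 ∨ r = H - 1 ∨ c = 0 ∨ c = W - 1) ∧ pvCell g r c = 0) ∧ q = (r, c) := by
    intro R
    induction R with
    | nil => simp
    | cons r t ih =>
      intro init
      rw [List.foldl_cons, ih, pv_mem_foldl_consif
        (P := fun c => (r = 0 ∨ r = H - 1 ∨ c = 0 ∨ c = W - 1) ∧ pvCell g r c = 0)
        (f := fun c => (r, c))]
      simp only [List.exists_mem_cons_iff]
      constructor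
      · rintro ((h | ⟨c, hc, hP, rfl⟩) | h)
        · exact Or.inl h
        · exact Or.inr (Or.inl ⟨c, by simpa using PySem.List.mem_pyRange_one.1 hc, hP, rfl⟩)
        · exact Or.inr (Or.inr h)
      · rintro (h | ⟨c, hcb, hP, rfl⟩ | h)
        · exact Or.inl (Or.inl h)
        · exact Or.inl (Or.inr ⟨c, PySem.List.mem_pyRange_one.2 (by omega), hP, rfl⟩)
        · exact Or.inr h
  rw [main]
  simp only [List.not_mem_nil, false_or]
  constructor
  · rintro ⟨r, hr, c, hcb, ⟨hb, h0⟩, rfl⟩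
    have hrb := PySem.List.mem_pyRange_one.1 hr
    exact ⟨⟨⟨by omega, by omega, by omega, by omega⟩, h0⟩, hb⟩
  · rintro ⟨⟨⟨h1, h2, h3, h4⟩, h0⟩, hb⟩
    exact ⟨q.1, PySem.List.mem_pyRange_one.2 (by omega), q.2, ⟨h3, h4⟩, ⟨hb, h0⟩, by simp⟩

-- B's seed set: same cells, built as a PySem.Set
lemma pv_seedsB_char (g : List (List Int)) (H W : Int) (q : Int × Int) :
    q ∈ (PySem.List.pyRange 0 H 1).foldl (fun s r =>
        (PySem.List.pyRange 0 W 1).foldl (fun s c =>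
          if pvCell g r c = 0 ∧ (r = 0 ∨ r = H - 1 ∨ c = 0 ∨ c = W - 1)
          then PySem.Set.add s (r, c) else s) s) PySem.Set.empty ↔
      pvZ g H W q ∧ pvBorder H W q := by
  have main : ∀ (R : List Int) (init : PySem.Set (Int × Int)),
      q ∈ R.foldl (fun s r => (PySem.List.pyRange 0 W 1).foldl (fun s c =>
          if pvCell g r c = 0 ∧ (r = 0 ∨ r = H - 1 ∨ c = 0 ∨ c = W - 1)
          then PySem.Set.add s (r, c) else s) s) init ↔
        q ∈ init ∨ ∃ r ∈ R, ∃ c, (0 ≤ c ∧ c < W) ∧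
          (pvCell g r c = 0 ∧ (r = 0 ∨ r = H - 1 ∨ c = 0 ∨ c = W - 1)) ∧ q = (r, c) := by
    intro R
    induction R with
    | nil => simp
    | cons r t ih =>
      intro init
      rw [List.foldl_cons, ih, pv_mem_foldl_addif
        (P := fun c => pvCell g r c = 0 ∧ (r = 0 ∨ r = H - 1 ∨ c = 0 ∨ c = W - 1))
        (f := fun c => (r, c))]
      simp only [List.exists_mem_cons_iff]
      constructor
      · rintro ((h | ⟨c, hc, hP, rfl⟩) | h)
        · exact Or.inl h
        · exact Or.inr (Or.inl ⟨c, by simpa using PySem.List.mem_pyRange_one.1 hc, hP, rfl⟩)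
        · exact Or.inr (Or.inr h)
      · rintro (h | ⟨c, hcb, hP, rfl⟩ | h)
        · exact Or.inl (Or.inl h)
        · exact Or.inl (Or.inr ⟨c, PySem.List.mem_pyRange_one.2 (by omega), hP, rfl⟩)
        · exact Or.inr h
  rw [main]
  simp only [PySem.Set.empty, List.not_mem_nil, false_or]
  constructor
  · rintro ⟨r, hr, c, hcb, ⟨h0, hb⟩, rfl⟩
    have hrb := PySem.List.mem_pyRange_one.1 hr
    exact ⟨⟨⟨by omega, by omega, by omega, by omega⟩, h0⟩, hb⟩
  · rintro ⟨⟨⟨h1, h2, h3, h4⟩, h0⟩, hb⟩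
    exact ⟨q.1, PySem.List.mem_pyRange_one.2 (by omega), q.2, ⟨h3, h4⟩, ⟨h0, hb⟩, by simp⟩

lemma pv_seedsB_nodup (g : List (List Int)) (H W : Int) :
    ((PySem.List.pyRange 0 H 1).foldl (fun s r =>
        (PySem.List.pyRange 0 W 1).foldl (fun s c =>
          if pvCell g r c = 0 ∧ (r = 0 ∨ r = H - 1 ∨ c = 0 ∨ c = W - 1)
          then PySem.Set.add s (r, c) else s) s) PySem.Set.empty).Nodup := by
  have main : ∀ (R : List Int) (init : PySem.Set (Int × Int)), init.Nodup →
      (R.foldl (fun s r => (PySem.List.pyRange 0 W 1).foldl (fun s c =>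
          if pvCell g r c = 0 ∧ (r = 0 ∨ r = H - 1 ∨ c = 0 ∨ c = W - 1)
          then PySem.Set.add s (r, c) else s) s) init).Nodup := by
    intro R
    induction R with
    | nil => exact fun init h => h
    | cons r t ih =>
      intro init hnd
      simp only [List.foldl_cons]
      exact ih _ (pv_nodup_foldl_addif (P := fun c => pvCell g r c = 0 ∧
        (r = 0 ∨ r = H - 1 ∨ c = 0 ∨ c = W - 1)) (f := fun c => (r, c)) _ init hnd)
  exact main _ _ (by simp [PySem.Set.empty])

-- a fold that conditionally updates is determined by the truth table of its condition
lemma pv_foldl_if_congr {β γ : Type} (P Q : γ → Prop) [DecidablePred P] [DecidablePred Q]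
    (g : β → γ → β) (h : ∀ x, P x ↔ Q x) :
    ∀ (l : List γ) (i : β),
      l.foldl (fun s x => if P x then g s x else s) i =
        l.foldl (fun s x => if Q x then g s x else s) i := by
  intro l
  induction l with
  | nil => intro i; rfl
  | cons x t ih =>
    intro i
    simp only [List.foldl_cons]
    by_cases hx : P x
    · rw [if_pos hx, if_pos ((h x).1 hx), ih]
    · rw [if_neg hx, if_neg (fun hq => hx ((h x).2 hq)), ih]

-- the two fill passes agree when the two reachable sets have the same members
lemma pv_result_eq (g : List (List Int)) (fill : Int) (H W : Int)
    (SA SB : List (Int × Int)) (hAB : ∀ q, q ∈ SA ↔ q ∈ SB) :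
    (PySem.List.pyRange 0 H 1).foldl (fun res r =>
      (PySem.List.pyRange 0 W 1).foldl (fun res c =>
        if pvCell g r c = 0 ∧ (r, c) ∉ SA then pvSet2 res r c fill else res) res) g =
    (PySem.List.pyRange 0 H 1).foldl (fun res r =>
      (PySem.List.pyRange 0 W 1).foldl (fun res c =>
        if pvCell g r c = 0 ∧ (r, c) ∉ SB then pvSet2 res r c fill else res) res) g := by
  have hfun : (fun (res : List (List Int)) (r : Int) =>
      (PySem.List.pyRange 0 W 1).foldl (fun res c =>
        if pvCell g r c = 0 ∧ (r, c) ∉ SA then pvSet2 res r c fill else res) res) =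
      (fun (res : List (List Int)) (r : Int) =>
      (PySem.List.pyRange 0 W 1).foldl (fun res c =>
        if pvCell g r c = 0 ∧ (r, c) ∉ SB then pvSet2 res r c fill else res) res) := by
    funext res r
    exact pv_foldl_if_congr
      (P := fun c => pvCell g r c = 0 ∧ (r, c) ∉ SA)
      (Q := fun c => pvCell g r c = 0 ∧ (r, c) ∉ SB)
      (fun res c => pvSet2 res r c fill)
      (fun c => by
        constructor
        · rintro ⟨h0, hA⟩; exact ⟨h0, fun hB => hA ((hAB _).2 hB)⟩
        · rintro ⟨h0, hB⟩; exact ⟨h0, fun hA => hB ((hAB _).1 hA)⟩) _ res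
  rw [hfun]

-- ===== VERDICT (by name: the statement is the Claim_ definition above) =====
theorem flood_fill_enclosed_with_accent_spec : Claim_equal_flood_fill_enclosed_with_accent := by
  intro grid _ _
  unfold Spec_flood_fill_enclosed_with_accent
  unfold flood_fill_enclosed_with_accent flood_fill_enclosed_with_accent_alt
  by_cases hg : grid = [] ∨ grid.headD [] = []
  · rw [if_pos hg, if_pos hg]
  · rw [if_neg hg, if_neg hg]
    have hchar := pv_seedsA_char grid (grid.length : Int) ((grid.headD []).length : Int)
    have hcharB := pv_seedsB_char grid (grid.length : Int) ((grid.headD []).length : Int)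
    have hunv0 : pvUnv (grid.length : Int) ((grid.headD []).length : Int) PySem.Set.empty =
        grid.length * (grid.headD []).length := by
      rw [pvUnv, ← pv_length_CL]
      simp [PySem.Set.empty]
    have hvis := pvDfsA_spec grid (grid.length : Int) ((grid.headD []).length : Int)
      (5 * (grid.length * (grid.headD []).length) +
        ((PySem.List.pyRange 0 (grid.length : Int) 1).foldl (fun st r =>
          (PySem.List.pyRange 0 ((grid.headD []).length : Int) 1).foldl (fun st c =>
            if (r = 0 ∨ r = (grid.length : Int) - 1 ∨ c = 0 ∨ c = ((grid.headD []).length : Int) - 1) ∧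
              pvCell grid r c = 0 then (r, c) :: st else st) st) []).length + 1)
      ((PySem.List.pyRange 0 (grid.length : Int) 1).foldl (fun st r =>
          (PySem.List.pyRange 0 ((grid.headD []).length : Int) 1).foldl (fun st c =>
            if (r = 0 ∨ r = (grid.length : Int) - 1 ∨ c = 0 ∨ c = ((grid.headD []).length : Int) - 1) ∧
              pvCell grid r c = 0 then (r, c) :: st else st) st) [])
      PySem.Set.empty
      (fun p hp => ((hchar p).1 hp).1)
      (fun p hp => pvReach.seed p ((hchar p).1 hp).1 ((hchar p).1 hp).2)
      (fun p hp => absurd hp (by simp [PySem.Set.empty]))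
      (fun p hp => absurd hp (by simp [PySem.Set.empty]))
      (by simp [PySem.Set.empty])
      (fun p hp => absurd hp (by simp [PySem.Set.empty]))
      (fun p hz hb => Or.inr ((hchar p).2 ⟨hz, hb⟩))
      (by rw [hunv0]; omega)
    have hreach := pvLoopB_spec grid (grid.length : Int) ((grid.headD []).length : Int)
      (grid.length * (grid.headD []).length + 1)
      ((PySem.List.pyRange 0 (grid.length : Int) 1).foldl (fun s r =>
        (PySem.List.pyRange 0 ((grid.headD []).length : Int) 1).foldl (fun s c =>
          if pvCell grid r c = 0 ∧
            (r = 0 ∨ r = (grid.length : Int) - 1 ∨ c = 0 ∨ c = ((grid.headD []).length : Int) - 1)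
          then PySem.Set.add s (r, c) else s) s) PySem.Set.empty)
      (pv_seedsB_nodup grid _ _)
      (fun p hp => pvReach.seed p ((hcharB p).1 hp).1 ((hcharB p).1 hp).2)
      (fun p hp => ((hcharB p).1 hp).1.1)
      (fun p hz hb => (hcharB p).2 ⟨hz, hb⟩)
      (by
        refine lt_of_le_of_lt (List.countP_le_length) ?_
        rw [pv_length_CL]
        omega)
    exact pv_result_eq grid _ _ _ _ _ (fun q => (hvis q).trans ((hreach q).symm))
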